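-- pv_equiv track=rewrite | github.com/a-llyson/musically-secure | password.py | note_password_gen
-- ===== SOURCE A (Python) =====
-- notes = 'CDEFGAB1234567'
--
-- def note_password_gen(pass_list):
--     all_password_sound = []
--     single_password_sound = []
--
--     # separates password into notes
--     for i in pass_list:
--         single_note = ''
--         for letter in i:
--             if letter in notes:
--                 if single_note != '':
--                     single_password_sound.append(single_note)
--                 single_note = letter
--             else:
--                 single_note += letter
--
--         if single_note != '':
--             single_password_sound.append(single_note)
--
--         all_password_sound.append(single_password_sound)
--         single_password_sound = []
--
--     return all_password_sound
-- ===== SOURCE B (Python) =====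
-- notes = 'CDEFGAB1234567'
--
-- def note_password_gen(pass_list):
--     # boundary-based: find note positions first, then slice between consecutive starts
--     out = []
--     for s in pass_list:
--         if not s:
--             out.append([])
--             continue
--         idxs = [i for i, ch in enumerate(s) if ch in notes]
--         starts = idxs if idxs and idxs[0] == 0 else [0] + idxs
--         ends = starts[1:] + [len(s)]
--         out.append([s[a:b] for a, b in zip(starts, ends)])
--     return out
-- ===== Notes on version B (the rewrite author's own statement) =====
-- stated objective: alternative
-- what changed: B first collects the indices of note characters, derives the sorted list of segment starts (prepending 0 for a leading non-note group) and slices the string between consecutive starts, instead of A's character-by-character accumulation of the current group.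
import Mathlib
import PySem

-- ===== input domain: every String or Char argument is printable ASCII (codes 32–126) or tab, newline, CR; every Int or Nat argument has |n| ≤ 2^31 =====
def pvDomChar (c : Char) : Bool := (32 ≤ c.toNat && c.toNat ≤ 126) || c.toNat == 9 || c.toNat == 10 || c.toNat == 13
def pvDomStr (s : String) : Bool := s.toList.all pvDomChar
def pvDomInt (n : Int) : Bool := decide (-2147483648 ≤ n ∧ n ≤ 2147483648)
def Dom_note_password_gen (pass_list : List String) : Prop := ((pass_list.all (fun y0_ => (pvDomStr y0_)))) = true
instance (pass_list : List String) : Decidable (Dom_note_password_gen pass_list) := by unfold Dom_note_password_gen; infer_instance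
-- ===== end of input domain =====

-- B re-implements A by locating the note boundaries first and slicing the string
-- between consecutive starts, instead of accumulating characters one at a time
-- (objective: alternative decomposition; same asymptotic cost).

-- notes = 'CDEFGAB1234567'  (module constant, shared by both ports)
def pvNotes : List Char := "CDEFGAB1234567".toList

-- ===== PORT A =====
-- inner loop of A over one password: state = (current single_note, accumulated groups);
-- strings handled as List Char with String.mk at the append points (exact on all inputs)
def pvInnerA : List Char → List Char → List String → List String
  | [], single, acc => if single = [] then acc else acc ++ [String.mk single]
  | c :: rest, single, acc =>
      if c ∈ pvNotes then
        pvInnerA rest [c] (if single = [] then acc else acc ++ [String.mk single])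
      else
        pvInnerA rest (single ++ [c]) acc

def note_password_gen (pass_list : List String) : List (List String) :=
  pass_list.foldl (fun all i => all ++ [pvInnerA i.toList [] []]) []

-- ===== PORT B =====
-- one password in B: note indices via enumerate, starts, ends, then slices
def pvAltOne (s : String) : List String :=
  let cs := s.toList
  if cs = [] then []
  else
    let idxs : List Int :=
      (PySem.List.enumerate cs 0).filterMap (fun p => if p.2 ∈ pvNotes then some p.1 else none)
    let starts : List Int := if idxs.head? = some 0 then idxs else 0 :: idxs
    let ends : List Int := starts.tail ++ [(cs.length : Int)]
    (starts.zip ends).map (fun p => String.mk (PySem.List.slice cs (some p.1) (some p.2)))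

def note_password_gen_alt (pass_list : List String) : List (List String) :=
  pass_list.map pvAltOne

-- ===== PRECONDITION & SPEC =====
def Spec_note_password_gen (pass_list : List String) (out : List (List String)) : Prop := out = note_password_gen_alt pass_list
instance (pass_list : List String) (out : List (List String)) : Decidable (Spec_note_password_gen pass_list out) := by unfold Spec_note_password_gen; infer_instance

-- ===== CLAIM (what is proved, stated in full; the proofs are below) =====
def Claim_equal_note_password_gen : Prop := ∀ (pass_list : List String), Dom_note_password_gen pass_list → Spec_note_password_gen pass_list (note_password_gen pass_list)

-- ===== LEMMAS AND PROOFS =====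

-- common reference function: groups of one password as lists of chars
def pvH : List Char → List (List Char)
  | [] => []
  | c :: [] => [[c]]
  | c :: d :: rest =>
      if d ∈ pvNotes then [c] :: pvH (d :: rest)
      else
        match pvH (d :: rest) with
        | [] => [[c]]
        | g :: gs => (c :: g) :: gs

lemma pvH_ne_nil (c : Char) (cs : List Char) : pvH (c :: cs) ≠ [] := by
  cases cs with
  | nil => simp [pvH]
  | cons d rest =>
    unfold pvH
    split
    · simp
    · rcases h : pvH (d :: rest) with _ | ⟨g, gs⟩ <;> simp [h]

-- A-side: char-level functional version of the inner loop
def pvFc (single : List Char) : List Char → List (List Char)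
  | [] => if single = [] then [] else [single]
  | c :: rest =>
      if c ∈ pvNotes then (if single = [] then [] else [single]) ++ pvFc [c] rest
      else pvFc (single ++ [c]) rest

lemma pvInnerA_eq (cs : List Char) : ∀ (single : List Char) (acc : List String),
    pvInnerA cs single acc = acc ++ (pvFc single cs).map String.mk := by
  induction cs with
  | nil => intro single acc; simp [pvInnerA, pvFc]; split <;> simp
  | cons c rest ih =>
    intro single acc
    simp only [pvInnerA, pvFc]
    split
    · rw [ih]
      split <;> simp
    · exact ih _ _

-- A's per-password result in terms of pvH
lemma pvFc_eq_H (cs : List Char) : ∀ single : List Char,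
    pvFc single cs =
      (match cs with
       | c :: _ => if c ∈ pvNotes then (if single = [] then [] else [single]) ++ pvH cs
                   else (single ++ (pvH cs).headD []) :: (pvH cs).tail
       | [] => if single = [] then [] else [single]) := by
  induction cs with
  | nil => intro single; rfl
  | cons c rest ih =>
    intro single
    simp only [pvFc]
    by_cases hc : c ∈ pvNotes
    · simp only [hc, if_pos]
      congr 1
      rw [ih [c]]
      cases rest with
      | nil => simp [pvH]
      | cons d r2 =>
        by_cases hd : d ∈ pvNotes
        · simp [pvH, hd]
        · simp only [hd, if_neg, not_false_iff, pvH, if_neg hd]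
          rcases h : pvH (d :: r2) with _ | ⟨g, gs⟩
          · exact absurd h (pvH_ne_nil d r2)
          · simp [h]
    · simp only [hc, if_neg, not_false_iff]
      rw [ih (single ++ [c])]
      cases rest with
      | nil => simp [pvH]
      | cons d r2 =>
        by_cases hd : d ∈ pvNotes
        · simp [pvH, hd]
        · simp only [hd, if_neg, not_false_iff, pvH]
          rcases h : pvH (d :: r2) with _ | ⟨g, gs⟩
          · exact absurd h (pvH_ne_nil d r2)
          · simp [h, hd]

lemma pvA_one (cs : List Char) : pvInnerA cs [] [] = (pvH cs).map String.mk := by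
  rw [pvInnerA_eq]
  rw [pvFc_eq_H]
  cases cs with
  | nil => rfl
  | cons c rest =>
    by_cases hc : c ∈ pvNotes
    · simp [hc]
    · rcases h : pvH (c :: rest) with _ | ⟨g, gs⟩
      · exact absurd h (pvH_ne_nil c rest)
      · simp [hc, h]

-- B-side: Nat-level note indices
def pvJ : List Char → List Nat
  | [] => []
  | c :: rest => (if c ∈ pvNotes then [0] else []) ++ (pvJ rest).map (· + 1)

-- Nat-level windows
def pvW (cs : List Char) (starts : List Nat) : List (List Char) :=
  (starts.zip (starts.tail ++ [cs.length])).map (fun p => (cs.drop p.1).take (p.2 - p.1))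

lemma pvW_cons (cs : List Char) (s0 : Nat) (ss : List Nat) :
    pvW cs (s0 :: ss) = ((cs.drop s0).take (ss.headD cs.length - s0)) :: pvW cs ss := by
  cases ss <;> simp [pvW]

lemma pvW_shift (c : Char) (cs : List Char) (ss : List Nat) :
    pvW (c :: cs) (ss.map (· + 1)) = pvW cs ss := by
  unfold pvW
  have h1 : (ss.map (· + 1)).tail ++ [(c :: cs).length] = (ss.tail ++ [cs.length]).map (· + 1) := by
    cases ss <;> simp
  rw [h1, List.zip_map, List.map_map]
  apply List.map_congr_left
  intro p _
  simp [Nat.succ_sub_succ]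

lemma pvW_eq_H (rest : List Char) : ∀ c : Char,
    pvW (c :: rest) (0 :: (pvJ rest).map (· + 1)) = pvH (c :: rest) := by
  induction rest with
  | nil => intro c; simp [pvJ, pvW, pvH]
  | cons d r2 ih =>
    intro c
    by_cases hd : d ∈ pvNotes
    · have hJ : pvJ (d :: r2) = 0 :: (pvJ r2).map (· + 1) := by simp [pvJ, hd]
      rw [hJ]
      rw [pvW_cons]
      have hsh : ((0 :: (pvJ r2).map (· + 1)).map (· + 1)) =
          (0 :: (pvJ r2).map (· + 1)).map (· + 1) := rfl
      have : pvW (c :: d :: r2) ((0 :: (pvJ r2).map (· + 1)).map (· + 1)) = pvH (d :: r2) := by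
        rw [pvW_shift, ih d]
      simp only [List.map_cons] at this ⊢
      rw [this]
      simp [pvH, hd]
    · have hJ : pvJ (d :: r2) = (pvJ r2).map (· + 1) := by simp [pvJ, hd]
      rw [hJ]
      rw [pvW_cons]
      have htail : pvW (c :: d :: r2) (((pvJ r2).map (· + 1)).map (· + 1)) = pvW r2 (pvJ r2) := by
        rw [pvW_shift, pvW_shift]
      rw [htail]
      have hone : pvW (d :: r2) (0 :: (pvJ r2).map (· + 1)) =
          ((d :: r2).take ((pvJ r2).map (· + 1)|>.headD (d :: r2).length)) :: pvW r2 (pvJ r2) := by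
        rw [pvW_cons, pvW_shift]; simp
      have hH : pvH (d :: r2) =
          ((d :: r2).take ((pvJ r2).map (· + 1)|>.headD (d :: r2).length)) :: pvW r2 (pvJ r2) := by
        rw [← ih d, hone]
      -- head of shifted-twice list
      have hhead : (((pvJ r2).map (· + 1)).map (· + 1)).headD (c :: d :: r2).length
          = ((pvJ r2).map (· + 1)).headD (d :: r2).length + 1 := by
        cases pvJ r2 <;> simp
      rw [hhead]
      have htake : (c :: d :: r2).take (((pvJ r2).map (· + 1)).headD (d :: r2).length + 1 - 0)
          = c :: (d :: r2).take (((pvJ r2).map (· + 1)).headD (d :: r2).length) := by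
        simp [List.take_succ_cons]
      simp only [List.drop_zero] at htake ⊢
      rw [htake]
      unfold pvH
      rw [if_neg hd, hH]

-- enumerate-based index list equals the Nat-level one, shifted by the start
lemma pvIdx_eq (cs : List Char) : ∀ s : Int,
    (PySem.List.enumerate cs s).filterMap (fun p => if p.2 ∈ pvNotes then some p.1 else none)
      = (pvJ cs).map (fun n : Nat => ((n : Int) + s)) := by
  induction cs with
  | nil => intro s; simp [PySem.List.enumerate_nil, pvJ]
  | cons c rest ih =>
    intro s
    rw [PySem.List.enumerate_cons, List.filterMap_cons]
    by_cases hc : c ∈ pvNotes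
    · rw [ih (s + 1)]
      simp only [pvJ, hc, if_true, List.singleton_append, List.map_cons, List.map_map,
        Nat.cast_zero, zero_add]
      congr 1
      apply List.map_congr_left
      intro a _
      simp only [Function.comp]
      push_cast
      ring
    · rw [ih (s + 1)]
      simp only [pvJ, hc, if_false, List.nil_append, List.map_map]
      apply List.map_congr_left
      intro a _
      simp only [Function.comp]
      push_cast
      ring

-- B's per-password function computes the windows
lemma pvAltOne_eq (s : String) : pvAltOne s = (pvH s.toList).map String.mk := by
  rcases h : s.toList with _ | ⟨c, rest⟩
  · simp [pvAltOne, h, pvH]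
  · have hidx' : ((PySem.List.enumerate (c :: rest) 0).filterMap
        (fun p => if p.2 ∈ pvNotes then some p.1 else none))
        = (pvJ (c :: rest)).map (fun n : Nat => (n : Int)) := by
      have := pvIdx_eq (c :: rest) 0
      simpa using this
    have hstarts : (if (((pvJ (c :: rest)).map (fun n : Nat => (n : Int))).head? = some 0)
        then (pvJ (c :: rest)).map (fun n : Nat => (n : Int))
        else 0 :: (pvJ (c :: rest)).map (fun n : Nat => (n : Int)))
        = (0 :: (pvJ rest).map (· + 1)).map (fun n : Nat => (n : Int)) := by
      by_cases hc : c ∈ pvNotes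
      · have hJ : pvJ (c :: rest) = 0 :: (pvJ rest).map (· + 1) := by simp [pvJ, hc]
        rw [hJ]
        simp
      · have hJ : pvJ (c :: rest) = (pvJ rest).map (· + 1) := by simp [pvJ, hc]
        rw [hJ]
        have hne : ((((pvJ rest).map (· + 1)).map (fun n : Nat => (n : Int))).head? ≠ some 0) := by
          rcases pvJ rest with _ | ⟨m, ms⟩
          · simp
          · simp
            push_cast
            omega
        rw [if_neg hne]
        simp
    rw [← pvW_eq_H rest c, ← h]
    unfold pvAltOne
    rw [h]
    simp only [reduceCtorEq, if_neg, not_false_iff, if_false]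
    rw [hidx', hstarts]
    generalize (0 :: (pvJ rest).map (· + 1)) = ss
    unfold pvW
    have htail : (((ss.map (fun n : Nat => (n : Int))).tail) ++ [((c :: rest).length : Int)])
        = (ss.tail ++ [(c :: rest).length]).map (fun n : Nat => (n : Int)) := by
      cases ss <;> simp
    rw [htail, List.zip_map, List.map_map, List.map_map]
    apply List.map_congr_left
    intro p hp
    simp only [Function.comp, Prod.map]
    rw [PySem.List.slice_natCast]

-- A's outer fold is a map
lemma pvFold_eq (l : List String) : ∀ acc : List (List String),
    l.foldl (fun all i => all ++ [pvInnerA i.toList [] []]) acc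
      = acc ++ l.map (fun i => pvInnerA i.toList [] []) := by
  induction l with
  | nil => intro acc; simp
  | cons x xs ih => intro acc; simp [List.foldl_cons, ih]

-- ===== VERDICT (by name: the statement is the Claim_ definition above) =====
theorem note_password_gen_spec : Claim_equal_note_password_gen := by
  intro pass_list _
  unfold Spec_note_password_gen note_password_gen note_password_gen_alt
  rw [pvFold_eq]
  simp only [List.nil_append]
  apply List.map_congr_left
  intro s _
  rw [pvA_one, pvAltOne_eq]
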